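-- pv_equiv track=rewrite | github.com/DeiTo23/EjerciciosPY | EjercicIOs*/3.py | encontrar_secuencias_ascendentes
-- ===== SOURCE A (Python) =====
-- def encontrar_secuencias_ascendentes(vector):
--     secuencias = []
--     secuencia = [vector[0]]
--     for i in range(1, len(vector)):
--         if vector[i] > vector[i - 1]:
--             secuencia.append(vector[i])
--         else:
--             if len(secuencia) > 1:
--                 secuencias.append(secuencia)
--             secuencia = [vector[i]]
--     if len(secuencia) > 1:
--         secuencias.append(secuencia)
--
--     return secuencias
-- ===== SOURCE B (Python) =====
-- def encontrar_secuencias_ascendentes(vector):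
--     cuts = [0]
--     for i in range(1, len(vector)):
--         if vector[i] <= vector[i - 1]:
--             cuts.append(i)
--     cuts.append(len(vector))
--     res = []
--     for a, b in zip(cuts, cuts[1:]):
--         if b - a > 1:
--             res.append(list(vector[a:b]))
--     return res
-- ===== Notes on version B (the rewrite author's own statement) =====
-- stated objective: alternative
-- what changed: B first collects the cut positions (indices where the ascent breaks) in one pass, then builds the result from slices between consecutive cuts, instead of A's single pass that grows and flushes a current-run accumulator.
import Mathlib
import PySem

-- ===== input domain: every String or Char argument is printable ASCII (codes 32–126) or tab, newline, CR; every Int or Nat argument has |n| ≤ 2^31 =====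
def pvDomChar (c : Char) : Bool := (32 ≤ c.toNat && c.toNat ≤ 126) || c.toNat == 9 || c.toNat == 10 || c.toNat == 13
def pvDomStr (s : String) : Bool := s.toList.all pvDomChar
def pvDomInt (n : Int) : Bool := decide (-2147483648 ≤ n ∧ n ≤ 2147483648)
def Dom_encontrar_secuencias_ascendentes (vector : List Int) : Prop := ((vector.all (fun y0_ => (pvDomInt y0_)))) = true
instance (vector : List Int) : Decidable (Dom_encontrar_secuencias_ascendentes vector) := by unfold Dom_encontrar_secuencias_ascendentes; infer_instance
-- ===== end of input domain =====

-- B replaces A's grow-and-flush run accumulator by a cut-positions pass followed by slicing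
-- between consecutive cuts (alternative decomposition, same cost); on [] A raises, B returns [].


-- ===== PORT A =====
-- loop body of A's single pass: state = (secuencias, secuencia)
def pvBodyA (vector : List Int) (st : List (List Int) × List Int) (i : Int) :
    List (List Int) × List Int :=
  if PySem.List.pyGetD vector i 0 > PySem.List.pyGetD vector (i - 1) 0 then
    (st.1, st.2 ++ [PySem.List.pyGetD vector i 0])
  else
    ((if st.2.length > 1 then st.1 ++ [st.2] else st.1), [PySem.List.pyGetD vector i 0])

-- vector[0] raises on []; that input is excluded by Pre_, the default 0 is never used there
def encontrar_secuencias_ascendentes (vector : List Int) : List (List Int) :=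
  let st := (PySem.List.pyRange 1 (vector.length : Int) 1).foldl (pvBodyA vector)
      ([], [PySem.List.pyGetD vector 0 0])
  if st.2.length > 1 then st.1 ++ [st.2] else st.1

-- ===== PORT B =====
-- first pass: cut indices (0, every break position, omitting the final len which is appended later)
def pvCutsBody (vector : List Int) (cs : List Int) (i : Int) : List Int :=
  if PySem.List.pyGetD vector i 0 ≤ PySem.List.pyGetD vector (i - 1) 0 then cs ++ [i] else cs

def pvCuts (vector : List Int) : List Int :=
  (PySem.List.pyRange 1 (vector.length : Int) 1).foldl (pvCutsBody vector) [0]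

def pvResBody (vector : List Int) (res : List (List Int)) (p : Int × Int) : List (List Int) :=
  if p.2 - p.1 > 1 then res ++ [PySem.List.slice vector (some p.1) (some p.2)] else res

def encontrar_secuencias_ascendentes_alt (vector : List Int) : List (List Int) :=
  let cuts := pvCuts vector ++ [(vector.length : Int)]
  (cuts.zip cuts.tail).foldl (pvResBody vector) []

-- ===== PRECONDITION & SPEC =====
-- Pre_ excludes only the empty list, on which Python A raises IndexError (vector[0]).
def Pre_encontrar_secuencias_ascendentes (vector : List Int) : Prop := vector ≠ []
instance (vector : List Int) : Decidable (Pre_encontrar_secuencias_ascendentes vector) := by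
  unfold Pre_encontrar_secuencias_ascendentes; infer_instance
def pvWitness_encontrar_secuencias_ascendentes : List Int := [1, 2, 1]

def Spec_encontrar_secuencias_ascendentes (vector : List Int) (out : List (List Int)) : Prop :=
  out = encontrar_secuencias_ascendentes_alt vector
instance (vector : List Int) (out : List (List Int)) :
    Decidable (Spec_encontrar_secuencias_ascendentes vector out) := by
  unfold Spec_encontrar_secuencias_ascendentes; infer_instance

-- ===== CLAIM (what is proved, stated in full; the proofs are below) =====
def Claim_equal_encontrar_secuencias_ascendentes : Prop :=
  ∀ (vector : List Int), Dom_encontrar_secuencias_ascendentes vector →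
    Pre_encontrar_secuencias_ascendentes vector →
    Spec_encontrar_secuencias_ascendentes vector (encontrar_secuencias_ascendentes vector)

-- ===== LEMMAS AND PROOFS =====

-- result of B's second pass, as a function of the cut list
def pvRes (xs cs : List Int) : List (List Int) := (cs.zip cs.tail).foldl (pvResBody xs) []

theorem pvZipTailAppend (cs : List Int) (x : Int) (h : cs ≠ []) :
    (cs ++ [x]).zip ((cs ++ [x]).tail) = cs.zip cs.tail ++ [(cs.getLast h, x)] := by
  induction cs with
  | nil => simp at h
  | cons a t ih =>
    cases t with
    | nil => simp
    | cons b u =>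
      have := ih (by simp)
      simp only [List.cons_append, List.zip_cons_cons, List.tail_cons] at this ⊢
      rw [this]
      simp [List.getLast]

theorem pvResAppend (xs cs : List Int) (x : Int) (h : cs ≠ []) :
    pvRes xs (cs ++ [x]) = pvResBody xs (pvRes xs cs) (cs.getLast h, x) := by
  unfold pvRes
  rw [pvZipTailAppend cs x h, List.foldl_append]
  rfl

theorem pvMain (xs : List Int) :
    ∀ (d k : ℕ) (cs : List Int) (hcs : cs ≠ []) (ℓ : Int),
      k + d = xs.length → 1 ≤ k → cs.getLast hcs = ℓ → 0 ≤ ℓ → ℓ < (k : Int) →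
      (let st := (PySem.List.pyRange (k : Int) (xs.length : Int) 1).foldl (pvBodyA xs)
          (pvRes xs cs, (xs.take k).drop ℓ.toNat);
       if st.2.length > 1 then st.1 ++ [st.2] else st.1)
      = pvRes xs ((PySem.List.pyRange (k : Int) (xs.length : Int) 1).foldl (pvCutsBody xs) cs
          ++ [(xs.length : Int)]) := by
  intro d
  induction d with
  | zero =>
    intro k cs hcs ℓ hkd hk hlast hl0 hlk
    have hkn : k = xs.length := by omega
    rw [PySem.List.pyRange_one_eq_nil (by exact_mod_cast le_of_eq hkn.symm)]
    simp only [List.foldl_nil]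
    rw [pvResAppend xs cs _ hcs, hlast]
    have hlen : ℓ.toNat ≤ xs.length := by omega
    have htake : xs.take k = xs := by rw [hkn]; exact List.take_length
    rw [htake]
    have hslice : PySem.List.slice xs (some ℓ) (some (xs.length : Int)) = xs.drop ℓ.toNat := by
      rw [PySem.List.slice_toNat xs hl0 (by positivity)]
      simp
    have hdl : (xs.drop ℓ.toNat).length = xs.length - ℓ.toNat := by simp
    unfold pvResBody
    simp only [hslice]
    by_cases hgt : (xs.length : Int) - ℓ > 1
    · rw [if_pos (by omega), if_pos hgt]
    · rw [if_neg (by omega), if_neg hgt]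
  | succ d ih =>
    intro k cs hcs ℓ hkd hk hlast hl0 hlk
    have hkn : k < xs.length := by omega
    have hkn' : (k : Int) < (xs.length : Int) := by exact_mod_cast hkn
    rw [PySem.List.pyRange_one_cons hkn']
    simp only [List.foldl_cons]
    have hget : PySem.List.pyGetD xs (k : Int) 0 = xs[k] := by
      rw [PySem.List.pyGetD_natCast]; exact List.getD_eq_getElem xs 0 hkn
    have hkm1 : (k : Int) - 1 = ((k - 1 : ℕ) : Int) := by omega
    have hgetm : PySem.List.pyGetD xs ((k : Int) - 1) 0 = xs[k - 1]'(by omega) := by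
      rw [hkm1, PySem.List.pyGetD_natCast]
      exact List.getD_eq_getElem xs 0 (by omega)
    by_cases hcmp : xs[k] > xs[k - 1]'(by omega)
    · -- ascending: A extends secuencia, B adds no cut
      rw [show pvBodyA xs (pvRes xs cs, (xs.take k).drop ℓ.toNat) (k : Int)
            = (pvRes xs cs, (xs.take (k + 1)).drop ℓ.toNat) from ?_,
          show pvCutsBody xs cs (k : Int) = cs from ?_]
      · have := ih (k + 1) cs hcs ℓ (by omega) (by omega) hlast hl0 (by push_cast; omega)
        exact_mod_cast this
      · unfold pvCutsBody
        rw [hget, hgetm, if_neg (by omega)]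
      · unfold pvBodyA
        rw [hget, hgetm, if_pos hcmp]
        have htk : xs.take (k + 1) = xs.take k ++ [xs[k]] := List.take_succ_eq_append_getElem hkn
        rw [htk, List.drop_append_of_le_length (by simp; omega)]
    · -- break: A flushes secuencia, B records cut k
      rw [show pvBodyA xs (pvRes xs cs, (xs.take k).drop ℓ.toNat) (k : Int)
            = (pvRes xs (cs ++ [(k : Int)]), (xs.take (k + 1)).drop ((k : Int)).toNat) from ?_,
          show pvCutsBody xs cs (k : Int) = cs ++ [(k : Int)] from ?_]
      · have := ih (k + 1) (cs ++ [(k : Int)]) (by simp) (k : Int) (by omega) (by omega)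
          (by rw [List.getLast_append_right]; rfl; simp) (by positivity) (by push_cast; omega)
        exact_mod_cast this
      · unfold pvCutsBody
        rw [hget, hgetm, if_pos (by omega)]
      · unfold pvBodyA
        rw [hget, hgetm, if_neg (by omega)]
        congr 1
        · rw [pvResAppend xs cs _ hcs, hlast]
          unfold pvResBody
          have hslice : PySem.List.slice xs (some ℓ) (some (k : Int)) = (xs.take k).drop ℓ.toNat := by
            rw [PySem.List.slice_toNat xs hl0 (by positivity)]
            simp [List.drop_take]
          have hlen : ((xs.take k).drop ℓ.toNat).length = k - ℓ.toNat := by simp; omega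
          simp only [hslice]
          by_cases hgt : (k : Int) - ℓ > 1
          · rw [if_pos hgt, if_pos (by omega)]
          · rw [if_neg hgt, if_neg (by omega)]
        · rw [Int.toNat_natCast]
          rw [List.drop_take]
          simp
          rw [List.take_one_drop_eq_of_lt_length hkn]
          rfl

-- ===== VERDICT (by name: the statement is the Claim_ definition above) =====
theorem encontrar_secuencias_ascendentes_spec : Claim_equal_encontrar_secuencias_ascendentes := by
  intro xs _ hpre
  unfold Spec_encontrar_secuencias_ascendentes encontrar_secuencias_ascendentes
    encontrar_secuencias_ascendentes_alt pvCuts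
  obtain ⟨y, t, rfl⟩ := List.exists_cons_of_ne_nil hpre
  have h := pvMain (y :: t) (y :: t).length.pred 1 [0] (by simp) 0
    (by simp; omega) (by omega) rfl le_rfl (by omega)
  simp only at h
  have hinit : pvRes (y :: t) [0] = [] := rfl
  have hcur : ((y :: t).take 1).drop (0 : Int).toNat = [PySem.List.pyGetD (y :: t) 0 0] := by
    simp [PySem.List.pyGetD]
  rw [hinit, hcur] at h
  push_cast at h
  exact h
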